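-- pv_equiv track=rewrite | github.com/slonce70/Xbox-Code-Checker | src/data/file_manager.py | validate_xbox_code
-- ===== SOURCE A (Python) =====
-- def validate_xbox_code(code: str) -> bool:
--     """Проверяет формат Xbox кода"""
--     if not code:
--         return False
--
--     # Убираем пробелы
--     code = code.strip()
--
--     # Проверяем длину (должно быть 29 символов: XXXXX-XXXXX-XXXXX-XXXXX-XXXXX)
--     if len(code) != 29:
--         return False
--
--     # Проверяем формат (5 групп по 5 символов, разделенных дефисами)
--     parts = code.split('-')
--     if len(parts) != 5:
--         return False
--
--     for part in parts:
--         if len(part) != 5: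
--             return False
--         # Разрешаем буквенно-цифровые символы
--         if not all(c.isalnum() for c in part):
--             return False
--
--     return True
-- ===== SOURCE B (Python) =====
-- def validate_xbox_code(code: str) -> bool:
--     if not code:
--         return False
--
--     code = code.strip()
--
--     if len(code) != 29:
--         return False
--
--     # Recursive decomposition: repeatedly consume a group of 5 alphanumeric
--     # characters, then a '-' separator, 5 groups in total.
--     return _check_groups(5, list(code))
--
--
-- def _consume(chars, n):
--     """Consume exactly n alphanumeric chars from the front; remainder or None."""
--     if n == 0:
--         return chars
--     if not chars or not chars[0].isalnum():
--         return None
--     return _consume(chars[1:], n - 1)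
--
--
-- def _check_groups(k, chars):
--     rest = _consume(chars, 5)
--     if rest is None:
--         return False
--     if k == 1:
--         return not rest
--     if rest[:1] == ['-']:
--         return _check_groups(k - 1, rest[1:])
--     return False
-- ===== Notes on version B (the rewrite author's own statement) =====
-- stated objective: alternative
-- what changed: Replaced split('-') plus a per-part loop with a recursive parser that consumes five alphanumeric characters and a '-' separator per group, five groups in total.
import Mathlib
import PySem

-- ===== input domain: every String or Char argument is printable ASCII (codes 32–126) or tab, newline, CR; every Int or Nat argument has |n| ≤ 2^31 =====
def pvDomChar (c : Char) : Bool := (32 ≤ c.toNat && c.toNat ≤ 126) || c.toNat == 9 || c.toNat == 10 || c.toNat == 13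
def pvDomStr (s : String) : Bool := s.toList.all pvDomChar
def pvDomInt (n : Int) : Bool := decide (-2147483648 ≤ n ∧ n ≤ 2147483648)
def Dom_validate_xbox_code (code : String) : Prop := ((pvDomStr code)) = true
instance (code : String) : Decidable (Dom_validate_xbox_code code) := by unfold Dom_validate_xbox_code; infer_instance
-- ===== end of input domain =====

-- B validates the code by a recursive group parser instead of A's split('-') + per-part loop (alternative decomposition).

-- ===== PORT A =====
-- the `for part in parts` loop with early returns, as structural recursion over parts
def pvPartsOk : List (List Char) → Bool
  | [] => true
  | part :: rest =>
    if part.length ≠ 5 then false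
    else if ¬ (part.all PySem.Chars.isalnum) then false
    else pvPartsOk rest

def validate_xbox_code (code : String) : Bool :=
  if code = "" then false
  else
    let code := PySem.Str.strip code
    if PySem.Str.len code ≠ 29 then false
    else
      -- code.split('-') with the non-empty separator '-': PySem.Chars.splitOn (exact)
      let parts := PySem.Chars.splitOn code.toList ['-']
      if parts.length ≠ 5 then false
      else pvPartsOk parts

-- ===== PORT B =====
-- _consume(chars, n): consume exactly n alphanumeric chars from the front
def pvConsume : List Char → Nat → Option (List Char)
  | cs, 0 => some cs
  | [], _ + 1 => none
  | c :: cs, n + 1 => if PySem.Chars.isalnum c then pvConsume cs n else none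

-- termination helper for pvCheckGroups (cited by decreasing_by)
theorem pvConsume_some_length (cs : List Char) (n : Nat) (rest : List Char)
    (h : pvConsume cs n = some rest) : rest.length + n = cs.length := by
  induction cs generalizing n rest with
  | nil =>
    cases n with
    | zero => simp [pvConsume] at h; simp [h]
    | succ m => simp [pvConsume] at h
  | cons c cs ih =>
    cases n with
    | zero => simp [pvConsume] at h; simp [h]
    | succ m =>
      simp only [pvConsume] at h
      by_cases hc : PySem.Chars.isalnum c
      · simp [hc] at h
        have := ih m rest h
        simp [List.length_cons]; omega
      · simp [hc] at h

-- _check_groups(k, chars)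
def pvCheckGroups (k : Nat) (cs : List Char) : Bool :=
  match h : pvConsume cs 5 with
  | none => false
  | some rest =>
    if k = 1 then rest.isEmpty
    else if rest.head? = some '-' then pvCheckGroups (k - 1) rest.tail
    else false
termination_by cs.length
decreasing_by
  have := pvConsume_some_length cs 5 _ h
  cases rest with
  | nil => simp at *
  | cons a r => simp at this ⊢; omega

def validate_xbox_code_alt (code : String) : Bool :=
  if code = "" then false
  else
    let code := PySem.Str.strip code
    if PySem.Str.len code ≠ 29 then false
    else pvCheckGroups 5 code.toList

-- ===== PRECONDITION & SPEC =====
def Spec_validate_xbox_code (code : String) (out : Bool) : Prop := out = validate_xbox_code_alt code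
instance (code : String) (out : Bool) : Decidable (Spec_validate_xbox_code code out) := by unfold Spec_validate_xbox_code; infer_instance

-- ===== CLAIM (what is proved, stated in full; the proofs are below) =====
def Claim_equal_validate_xbox_code : Prop := ∀ (code : String), Dom_validate_xbox_code code → Spec_validate_xbox_code code (validate_xbox_code code)

-- ===== LEMMAS AND PROOFS =====

-- reference form of split-on-single-dash, used only by the proofs
def pvSplitDash : List Char → List (List Char)
  | [] => [[]]
  | c :: cs =>
    if c = '-' then [] :: pvSplitDash cs
    else
      match pvSplitDash cs with
      | [] => [[c]]
      | p :: ps => (c :: p) :: ps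

def pvConsHead (x : List Char) : List (List Char) → List (List Char)
  | [] => [x]
  | p :: ps => (x ++ p) :: ps

theorem pvSplitDash_ne_nil (cs : List Char) : pvSplitDash cs ≠ [] := by
  cases cs with
  | nil => simp [pvSplitDash]
  | cons c cs =>
    simp only [pvSplitDash]
    split_ifs
    · simp
    · cases h : pvSplitDash cs <;> simp

theorem pvSplitDash_head (cs : List Char) :
    ∃ ps, pvSplitDash cs = cs.takeWhile (· ≠ '-') :: ps := by
  induction cs with
  | nil => exact ⟨[], rfl⟩
  | cons c cs ih =>
    by_cases hc : c = '-'
    · subst hc; exact ⟨pvSplitDash cs, by simp [pvSplitDash, List.takeWhile]⟩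
    · obtain ⟨ps, hps⟩ := ih
      refine ⟨ps, ?_⟩
      simp [pvSplitDash, hc, hps, List.takeWhile]

theorem pvSplitDash_no_dash (cs : List Char) (h : cs.all (· ≠ '-')) :
    pvSplitDash cs = [cs] := by
  induction cs with
  | nil => rfl
  | cons c cs ih =>
    simp only [List.all_cons, Bool.and_eq_true, decide_eq_true_eq] at h
    simp [pvSplitDash, h.1, ih h.2]

theorem pvSplitDash_append (h t : List Char) (hh : h.all (· ≠ '-')) :
    pvSplitDash (h ++ '-' :: t) = h :: pvSplitDash t := by
  induction h with
  | nil => simp [pvSplitDash]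
  | cons c cs ih =>
    simp only [List.all_cons, Bool.and_eq_true, decide_eq_true_eq] at hh
    simp [pvSplitDash, hh.1, ih hh.2]

-- the fuel loop of PySem.Chars.splitOn.go, for the single-char separator '-'
theorem pvSplitOn_go (fuel : Nat) (l cur : List Char) (acc : List (List Char))
    (hf : l.length ≤ fuel) :
    PySem.Chars.splitOn.go ['-'] fuel l cur acc
      = acc.reverse ++ pvConsHead cur.reverse (pvSplitDash l) := by
  induction fuel generalizing l cur acc with
  | zero =>
    have : l = [] := by cases l <;> simp_all
    subst this
    simp [PySem.Chars.splitOn.go, pvSplitDash, pvConsHead]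
  | succ fuel ih =>
    cases l with
    | nil => simp [PySem.Chars.splitOn.go, pvSplitDash, pvConsHead]
    | cons c rest =>
      simp only [PySem.Chars.splitOn.go]
      by_cases hc : c = '-'
      · subst hc
        have hpre : List.isPrefixOf ['-'] ('-' :: rest) = true := by
          simp [List.isPrefixOf]
        rw [if_pos hpre]
        have : List.drop (['-'] : List Char).length ('-' :: rest) = rest := by simp
        rw [this, ih rest [] ((List.reverse cur) :: acc) (by simpa using Nat.le_of_succ_le_succ hf)]
        cases hs : pvSplitDash rest with
        | nil => exact absurd hs (pvSplitDash_ne_nil rest)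
        | cons p ps => simp [pvSplitDash, hs, pvConsHead]
      · have hpre : List.isPrefixOf ['-'] (c :: rest) = false := by
          simp [List.isPrefixOf]
          exact fun hcc => absurd hcc.symm hc
        rw [if_neg (by simp [hpre])]
        rw [ih rest (c :: cur) acc (by simpa using Nat.le_of_succ_le_succ hf)]
        cases hs : pvSplitDash rest with
        | nil => exact absurd hs (pvSplitDash_ne_nil rest)
        | cons p ps => simp [pvSplitDash, hc, hs, pvConsHead]

theorem pvSplitOn_eq (cs : List Char) :
    PySem.Chars.splitOn cs ['-'] = pvSplitDash cs := by
  show PySem.Chars.splitOn.go ['-'] (cs.length + 1) cs [] [] = _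
  rw [pvSplitOn_go (cs.length + 1) cs [] [] (by omega)]
  cases hs : pvSplitDash cs with
  | nil => exact absurd hs (pvSplitDash_ne_nil cs)
  | cons p ps => simp [pvConsHead]

theorem pvAlnum_ne_dash (c : Char) (h : PySem.Chars.isalnum c = true) : c ≠ '-' := by
  intro hc; subst hc
  simp [PySem.Chars.isalnum, PySem.Chars.isalpha, PySem.Chars.isdigit,
    PySem.Chars.isupper, PySem.Chars.islower] at h

theorem pvConsume_some (cs : List Char) (n : Nat) (rest : List Char)
    (h : pvConsume cs n = some rest) :
    ∃ hd, cs = hd ++ rest ∧ hd.length = n ∧ hd.all PySem.Chars.isalnum = true := by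
  induction cs generalizing n rest with
  | nil =>
    cases n with
    | zero => simp [pvConsume] at h; exact ⟨[], by simp [h]⟩
    | succ m => simp [pvConsume] at h
  | cons c cs ih =>
    cases n with
    | zero => simp [pvConsume] at h; exact ⟨[], by simp [h]⟩
    | succ m =>
      simp only [pvConsume] at h
      by_cases hc : PySem.Chars.isalnum c
      · simp [hc] at h
        obtain ⟨hd, h1, h2, h3⟩ := ih m rest h
        exact ⟨c :: hd, by simp [h1], by simp [h2], by simp [hc, h3]⟩
      · simp [hc] at h

theorem pvConsume_of_prefix (hd cs : List Char) (hall : hd.all PySem.Chars.isalnum = true) :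
    pvConsume (hd ++ cs) hd.length = some cs := by
  induction hd with
  | nil => simp [pvConsume]
  | cons c hd ih =>
    simp only [List.all_cons, Bool.and_eq_true] at hall
    simp [pvConsume, hall.1, ih hall.2]

theorem pvTakeWhile_append (p : Char → Bool) (h : List Char) (c : Char) (r : List Char)
    (hh : h.all p = true) (hc : p c = true) :
    (h ++ c :: r).takeWhile p = h ++ c :: r.takeWhile p := by
  induction h with
  | nil => simp [hc]
  | cons a h ih =>
    simp only [List.all_cons, Bool.and_eq_true] at hh
    simp [hh.1, ih hh.2]

theorem pvAll_ne_dash (hd : List Char) (h : hd.all PySem.Chars.isalnum = true) :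
    hd.all (· ≠ '-') = true := by
  simp only [List.all_eq_true, decide_eq_true_eq] at *
  exact fun c hc => pvAlnum_ne_dash c (h c hc)

-- one-step unfolding of the well-founded pvCheckGroups
theorem pvCheckGroups_eq (k : Nat) (cs : List Char) :
    pvCheckGroups k cs = (match pvConsume cs 5 with
      | none => false
      | some rest =>
        if k = 1 then rest.isEmpty
        else if rest.head? = some '-' then pvCheckGroups (k - 1) rest.tail
        else false) := by
  rw [pvCheckGroups.eq_def]
  split
  next heq => rw [heq]
  next rest heq => rw [heq]

theorem pvCheckGroups_none (k : Nat) (cs : List Char) (h : pvConsume cs 5 = none) :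
    pvCheckGroups k cs = false := by
  rw [pvCheckGroups_eq, h]

theorem pvCheckGroups_some (k : Nat) (cs rest : List Char) (h : pvConsume cs 5 = some rest) :
    pvCheckGroups k cs
      = (if k = 1 then rest.isEmpty
         else if rest.head? = some '-' then pvCheckGroups (k - 1) rest.tail
         else false) := by
  rw [pvCheckGroups_eq, h]

theorem pvPartsOk_cons (part : List Char) (rest : List (List Char)) :
    pvPartsOk (part :: rest)
      = (if part.length ≠ 5 then false
         else if ¬ (part.all PySem.Chars.isalnum) then false
         else pvPartsOk rest) := rfl

-- the core equivalence: A's split + per-part loop equals B's group parser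
theorem pvCore (k : Nat) (hk : 1 ≤ k) (cs : List Char) :
    (if (pvSplitDash cs).length ≠ k then false else pvPartsOk (pvSplitDash cs))
      = pvCheckGroups k cs := by
  induction k generalizing cs with
  | zero => omega
  | succ k ih =>
    cases hcon : pvConsume cs 5 with
    | none =>
      rw [pvCheckGroups_none _ _ hcon]
      obtain ⟨ps, hps⟩ := pvSplitDash_head cs
      have hfail : pvPartsOk (pvSplitDash cs) = false := by
        rw [hps, pvPartsOk_cons]
        by_cases hlen : (cs.takeWhile (· ≠ '-')).length = 5
        · rw [if_neg (not_not_intro hlen)]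
          by_cases halnum : (cs.takeWhile (· ≠ '-')).all PySem.Chars.isalnum = true
          · exfalso
            have hcp := pvConsume_of_prefix (cs.takeWhile (· ≠ '-'))
              (cs.dropWhile (· ≠ '-')) halnum
            rw [hlen, List.takeWhile_append_dropWhile] at hcp
            rw [hcon] at hcp
            simp at hcp
          · rw [if_pos halnum]
        · rw [if_pos hlen]
      rw [hfail]
      split <;> rfl
    | some rest =>
      rw [pvCheckGroups_some _ _ _ hcon]
      obtain ⟨hd, hcs, hdlen, hdall⟩ := pvConsume_some cs 5 rest hcon
      have hdnd : hd.all (· ≠ '-') = true := pvAll_ne_dash hd hdall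
      subst hcs
      cases rest with
      | nil =>
        rw [List.append_nil, pvSplitDash_no_dash hd hdnd]
        have hok : pvPartsOk [hd] = true := by
          rw [pvPartsOk_cons, if_neg (not_not_intro hdlen), if_neg (not_not_intro hdall)]
          rfl
        by_cases hk0 : k = 0
        · subst hk0
          simp [hok]
        · have h1 : (1 : Nat) ≠ k + 1 := by omega
          have h2 : ¬ (k + 1 = 1) := by omega
          simp
          intro h
          exact absurd h hk0
      | cons c r =>
        by_cases hc : c = '-'
        · subst hc
          rw [pvSplitDash_append hd r hdnd]
          by_cases hk0 : k = 0
          · subst hk0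
            have hne := pvSplitDash_ne_nil r
            have hlen : (hd :: pvSplitDash r).length ≠ 1 := by
              cases hpr : pvSplitDash r with
              | nil => exact absurd hpr hne
              | cons p ps => simp
            simp
            intro h
            exact absurd h hne
          · have h1 : ¬ (k + 1 = 1) := by omega
            rw [if_neg h1, if_pos (show (('-' :: r).head? = some '-') from rfl)]
            simp only [Nat.add_sub_cancel, List.tail_cons]
            rw [← ih (by omega) r]
            by_cases hl : (pvSplitDash r).length = k
            · have e1 : ¬ ((hd :: pvSplitDash r).length ≠ k + 1) := by
                simp only [List.length_cons]; omega
              rw [if_neg e1, if_neg (not_not_intro hl), pvPartsOk_cons,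
                  if_neg (not_not_intro hdlen), if_neg (not_not_intro hdall)]
            · have e1 : (hd :: pvSplitDash r).length ≠ k + 1 := by
                simp only [List.length_cons]; omega
              rw [if_pos e1, if_pos hl]
        · -- rest starts with a character that is neither consumed nor a dash: both sides false
          have hr : (if k + 1 = 1 then (c :: r).isEmpty
              else if ((c :: r).head? = some '-') then pvCheckGroups (k + 1 - 1) (c :: r).tail
              else false) = false := by
            by_cases hk0 : k = 0
            · subst hk0; rfl
            · have h1 : ¬ (k + 1 = 1) := by omega
              rw [if_neg h1, if_neg (by simp [hc])]
          rw [hr]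
          obtain ⟨ps, hps⟩ := pvSplitDash_head (hd ++ c :: r)
          rw [pvTakeWhile_append _ hd c r hdnd (by simp [hc])] at hps
          have hlong : (hd ++ c :: List.takeWhile (· ≠ '-') r).length ≠ 5 := by
            simp only [List.length_append, List.length_cons, hdlen]; omega
          have hfail : pvPartsOk (pvSplitDash (hd ++ c :: r)) = false := by
            rw [hps, pvPartsOk_cons, if_pos hlong]
          rw [hfail]
          split <;> rfl

-- ===== VERDICT (by name: the statement is the Claim_ definition above) =====
theorem validate_xbox_code_spec : Claim_equal_validate_xbox_code := by
  intro code _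
  unfold Spec_validate_xbox_code validate_xbox_code validate_xbox_code_alt
  by_cases h0 : code = ""
  · simp [h0]
  · rw [if_neg h0, if_neg h0]
    by_cases hl : PySem.Str.len (PySem.Str.strip code) ≠ 29
    · rw [if_pos hl, if_pos hl]
    · rw [if_neg hl, if_neg hl]
      rw [pvSplitOn_eq]
      exact pvCore 5 (by omega) (PySem.Str.strip code).toList
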